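-- pv_equiv track=rewrite | github.com/bl4de/cs | AdventOfCode/2023/day2_cube_conundrum.py | extract_cubes
-- ===== SOURCE A (Python) =====
-- def extract_cubes(game: str) -> dict:
--     '''
--     extracts max cubes and returns list of color:qty
--     '''
--     blue = 0
--     red = 0
--     green = 0
--     for g in game.split(';'):
--         for color in g.split(','):
--             color_details = color.strip().split(' ')
--             if color_details[1] == 'blue' and int(color_details[0]) > blue:
--                 blue = int(color_details[0])
--             if color_details[1] == 'red' and int(color_details[0]) > red:
--                 red = int(color_details[0])
--             if color_details[1] == 'green' and int(color_details[0]) > green: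
--                 green = int(color_details[0])
--     return {
--         'blue': blue,
--         'red': red,
--         'green': green
--     }
-- ===== SOURCE B (Python) =====
-- def extract_cubes(game: str) -> dict:
--     entries = []
--     for g in game.split(';'):
--         for color in g.split(','):
--             t = color.strip().split(' ')
--             c = t[1]
--             if c in ('blue', 'red', 'green'):
--                 entries.append((c, int(t[0])))
--     return {c: max([0] + [q for col, q in entries if col == c])
--             for c in ('blue', 'red', 'green')}
-- ===== Notes on version B (the rewrite author's own statement) =====
-- stated objective: alternative
-- what changed: Replaces A's interleaved single-pass three-counter max-tracking with a two-phase collect-then-aggregate shape: phase one gathers (color, qty) entries for recognized colors, phase two computes each color's max over the collected entries via a comprehension.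
import Mathlib
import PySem

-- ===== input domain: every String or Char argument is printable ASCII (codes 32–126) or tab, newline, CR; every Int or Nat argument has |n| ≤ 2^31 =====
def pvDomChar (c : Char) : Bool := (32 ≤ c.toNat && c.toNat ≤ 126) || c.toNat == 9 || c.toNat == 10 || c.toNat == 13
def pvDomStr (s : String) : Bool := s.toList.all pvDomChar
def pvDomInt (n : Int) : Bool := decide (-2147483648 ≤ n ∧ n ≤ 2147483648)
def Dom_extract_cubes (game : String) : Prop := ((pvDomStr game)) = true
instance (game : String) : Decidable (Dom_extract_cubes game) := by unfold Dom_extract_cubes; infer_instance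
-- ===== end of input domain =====

-- B replaces A's interleaved single-pass three-counter max-tracking with a two-phase
-- collect-then-aggregate decomposition (alternative; same asymptotic cost).

-- Python str.split with a nonempty separator (sep is always ";" "," or " " here, so split? is some).
def pvSplit (s sep : String) : List String := (PySem.Str.split? s sep).getD []

-- ===== PORT A =====
-- A's single pass: three running maxima updated in place per token.
-- t[1] (IndexError) and int(t[0]) (ValueError) are totalised with .getD; those
-- raising inputs are excluded by Pre_extract_cubes.
def extract_cubes (game : String) : List (String × Int) :=
  let st := (pvSplit game ";").foldl (fun (s : Int × Int × Int) g =>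
    (pvSplit g ",").foldl (fun (s : Int × Int × Int) color =>
      let cd := pvSplit (PySem.Str.strip color) " "
      let c1 := (PySem.List.pyGet? cd 1).getD ""
      let q : Int := (PySem.Int.ofStr? ((PySem.List.pyGet? cd 0).getD "")).getD 0
      let blue := if c1 = "blue" ∧ q > s.1 then q else s.1
      let red := if c1 = "red" ∧ q > s.2.1 then q else s.2.1
      let green := if c1 = "green" ∧ q > s.2.2 then q else s.2.2
      (blue, red, green)) s) ((0 : Int), (0 : Int), (0 : Int))
  [("blue", st.1), ("red", st.2.1), ("green", st.2.2)]

-- ===== PORT B =====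
-- Phase one of B: collect (color, qty) entries for recognized colors.
def pvEntries (game : String) : List (String × Int) :=
  (pvSplit game ";").foldl (fun (acc : List (String × Int)) g =>
    (pvSplit g ",").foldl (fun (acc : List (String × Int)) color =>
      let t := pvSplit (PySem.Str.strip color) " "
      let c := (PySem.List.pyGet? t 1).getD ""
      if c = "blue" ∨ c = "red" ∨ c = "green" then
        acc ++ [(c, (PySem.Int.ofStr? ((PySem.List.pyGet? t 0).getD "")).getD 0)]
      else acc) acc) []

-- Phase two of B: per color, max([0] + [q for col, q in entries if col == c]).
def extract_cubes_alt (game : String) : List (String × Int) :=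
  let entries := pvEntries game
  ["blue", "red", "green"].map (fun c =>
    (c, (PySem.List.max? ((0 : Int) ::
          entries.filterMap (fun p => if p.1 = c then some p.2 else none))
          (fun q => q)).getD 0))

-- ===== PRECONDITION & SPEC =====
-- Pre_ excludes exactly the inputs where Python A raises: a token whose stripped
-- form splits into fewer than 2 fields (IndexError on t[1]), or a recognized
-- color whose count field is not int-parseable (ValueError).
def Pre_extract_cubes (game : String) : Prop :=
  ∀ g ∈ pvSplit game ";", ∀ color ∈ pvSplit g ",",
    (2 ≤ (pvSplit (PySem.Str.strip color) " ").length) ∧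
    (((pvSplit (PySem.Str.strip color) " ").getD 1 "" = "blue" ∨
      (pvSplit (PySem.Str.strip color) " ").getD 1 "" = "red" ∨
      (pvSplit (PySem.Str.strip color) " ").getD 1 "" = "green") →
      (PySem.Int.ofStr? ((pvSplit (PySem.Str.strip color) " ").getD 0 "")).isSome)
instance (game : String) : Decidable (Pre_extract_cubes game) := by unfold Pre_extract_cubes; infer_instance

def pvWitness_extract_cubes : String := "1 blue, 2 red; 3 green, 10 blue"

def Spec_extract_cubes (game : String) (out : List (String × Int)) : Prop := out = extract_cubes_alt game
instance (game : String) (out : List (String × Int)) : Decidable (Spec_extract_cubes game out) := by unfold Spec_extract_cubes; infer_instance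

-- ===== CLAIM (what is proved, stated in full; the proofs are below) =====
def Claim_equal_extract_cubes : Prop := ∀ (game : String), Dom_extract_cubes game → Pre_extract_cubes game → Spec_extract_cubes game (extract_cubes game)

-- ===== LEMMAS AND PROOFS =====

-- The flattened token stream both programs traverse.
def pvTokens (game : String) : List String :=
  (pvSplit game ";").flatMap (fun g => pvSplit g ",")

def pvColor (tok : String) : String :=
  (PySem.List.pyGet? (pvSplit (PySem.Str.strip tok) " ") 1).getD ""

def pvQty (tok : String) : Int :=
  (PySem.Int.ofStr? ((PySem.List.pyGet? (pvSplit (PySem.Str.strip tok) " ") 0).getD "")).getD 0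

-- A's per-token step (definitionally the port's inner lambda)
def pvStepA (s : Int × Int × Int) (tok : String) : Int × Int × Int :=
  (if pvColor tok = "blue" ∧ pvQty tok > s.1 then pvQty tok else s.1,
   if pvColor tok = "red" ∧ pvQty tok > s.2.1 then pvQty tok else s.2.1,
   if pvColor tok = "green" ∧ pvQty tok > s.2.2 then pvQty tok else s.2.2)

-- B's per-token step (definitionally the port's inner lambda)
def pvStepB (acc : List (String × Int)) (tok : String) : List (String × Int) :=
  if pvColor tok = "blue" ∨ pvColor tok = "red" ∨ pvColor tok = "green" then
    acc ++ [(pvColor tok, pvQty tok)] else acc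

-- per-color quantity list drawn from the token stream
def pvColQ (ts : List String) (c : String) : List Int :=
  ts.filterMap (fun tok => if pvColor tok = c then some (pvQty tok) else none)

theorem pv_foldl_flatMap {α β γ : Type} (l : List α) (f : α → List β)
    (step : γ → β → γ) (init : γ) :
    l.foldl (fun s g => (f g).foldl step s) init = (l.flatMap f).foldl step init := by
  induction l generalizing init with
  | nil => rfl
  | cons h t ih => simp [List.flatMap_cons, List.foldl_append, ih]

theorem pv_foldl_max_cons (q x : Int) (l : List Int) :
    (q :: l).foldl max x = l.foldl max (if q > x then q else x) := by
  simp only [List.foldl_cons]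
  congr 1
  omega

theorem pvA_fold (ts : List String) : ∀ (b r g : Int),
    ts.foldl pvStepA (b, r, g)
    = ((pvColQ ts "blue").foldl max b, (pvColQ ts "red").foldl max r,
       (pvColQ ts "green").foldl max g) := by
  induction ts with
  | nil => intro b r g; rfl
  | cons tok t ih =>
    intro b r g
    have hcol : ∀ (c : String) (x : Int), (pvColQ (tok :: t) c).foldl max x
        = (pvColQ t c).foldl max (if pvColor tok = c ∧ pvQty tok > x then pvQty tok else x) := by
      intro c x
      simp only [pvColQ, List.filterMap_cons]
      by_cases h : pvColor tok = c
      · simp only [h, true_and, if_pos]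
        rw [pv_foldl_max_cons]
      · simp [h]
    rw [List.foldl_cons, hcol, hcol, hcol]
    simp only [pvStepA]
    exact ih _ _ _

theorem pv_gen_filter (col : String → String) (qty : String → Int)
    (ts : List String) (c : String) (hc : c = "blue" ∨ c = "red" ∨ c = "green") :
    ((ts.filter (fun x => decide (col x = "blue" ∨ col x = "red" ∨ col x = "green"))).map
        (fun x => (col x, qty x))).filterMap (fun p => if p.1 = c then some p.2 else none)
    = ts.filterMap (fun x => if col x = c then some (qty x) else none) := by
  induction ts with
  | nil => rfl
  | cons x t ih =>
    simp only [Bool.decide_or] at ih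
    by_cases hb : col x = "blue" <;> by_cases hr : col x = "red" <;>
      by_cases hg : col x = "green" <;> rcases hc with rfl | rfl | rfl <;>
      simp [hb, hr, hg, ih]

theorem pv_filterMap_entries (ts : List String) (c : String)
    (hc : c = "blue" ∨ c = "red" ∨ c = "green") :
    (ts.foldl pvStepB []).filterMap (fun p => if p.1 = c then some p.2 else none)
    = pvColQ ts c := by
  have hB : pvStepB = fun (acc : List (String × Int)) tok =>
      if pvColor tok = "blue" ∨ pvColor tok = "red" ∨ pvColor tok = "green" then
        acc ++ [(pvColor tok, pvQty tok)] else acc := rfl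
  rw [hB]
  rw [PySem.List.foldl_append_ite
    (p := fun tok => pvColor tok = "blue" ∨ pvColor tok = "red" ∨ pvColor tok = "green")
    (f := fun tok => (pvColor tok, pvQty tok))]
  simp only [List.nil_append]
  exact pv_gen_filter pvColor pvQty ts c hc

theorem pv_max_cons (q : Int) (qs : List Int) :
    (PySem.List.max? (q :: qs) (fun x => x)).getD 0 = qs.foldl max q := by
  rw [PySem.List.max?_id_cons]; rfl

theorem extract_cubes_spec' (game : String) :
    extract_cubes game = extract_cubes_alt game := by
  have hA : extract_cubes game =
      (let st := (pvSplit game ";").foldl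
          (fun s g => (pvSplit g ",").foldl pvStepA s) ((0 : Int), (0 : Int), (0 : Int));
       [("blue", st.1), ("red", st.2.1), ("green", st.2.2)]) := rfl
  have hB : extract_cubes_alt game =
      (let entries := (pvSplit game ";").foldl
          (fun acc g => (pvSplit g ",").foldl pvStepB acc) ([] : List (String × Int));
       ["blue", "red", "green"].map (fun c =>
         (c, (PySem.List.max? ((0 : Int) ::
               entries.filterMap (fun p => if p.1 = c then some p.2 else none))
               (fun q => q)).getD 0))) := rfl
  rw [hA, hB]
  simp only [pv_foldl_flatMap, List.map_cons, List.map_nil]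
  rw [pv_filterMap_entries _ "blue" (Or.inl rfl),
      pv_filterMap_entries _ "red" (Or.inr (Or.inl rfl)),
      pv_filterMap_entries _ "green" (Or.inr (Or.inr rfl)),
      pv_max_cons, pv_max_cons, pv_max_cons,
      pvA_fold]

-- ===== VERDICT (by name: the statement is the Claim_ definition above) =====
theorem extract_cubes_spec : Claim_equal_extract_cubes := by
  intro game _ _
  exact extract_cubes_spec' game
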